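-- pv_equiv track=rewrite | github.com/near/mpc | .github/workflows/scripts/format_pr_comments.py | truncate_diff_hunk
-- ===== SOURCE A (Python) =====
-- def truncate_diff_hunk(diff_hunk: str, max_length: int = 500) -> str:
--     """
--     Truncate diff hunk at line boundaries to avoid cutting mid-line.
--
--     Args:
--         diff_hunk: The diff hunk text to truncate
--         max_length: Maximum character length before truncation
--
--     Returns:
--         Truncated diff hunk with indicator if truncation occurred
--     """
--     if len(diff_hunk) <= max_length:
--         return diff_hunk
--
--     lines = diff_hunk.split('\n')
--     truncated_lines = []
--     char_count = 0
--
--     for line in lines: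
--         line_length = len(line) + 1  # +1 for newline
--         if char_count + line_length > max_length and truncated_lines:
--             break
--         truncated_lines.append(line)
--         char_count += line_length
--
--     return '\n'.join(truncated_lines) + "\n... (truncated)"
-- ===== SOURCE B (Python) =====
-- def truncate_diff_hunk(diff_hunk: str, max_length: int = 500) -> str:
--     """Truncate at the last newline that fits within max_length, keeping at
--     least one line; works directly on the string (no split into lines)."""
--     if len(diff_hunk) <= max_length:
--         return diff_hunk
--     cut = diff_hunk.rfind('\n', 0, max(0, max_length))
--     if cut == -1:
--         nl = diff_hunk.find('\n')
--         cut = nl if nl != -1 else len(diff_hunk)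
--     return diff_hunk[:cut] + "\n... (truncated)"
-- ===== Notes on version B (the rewrite author's own statement) =====
-- stated objective: alternative
-- what changed: Instead of splitting the whole text into lines and accumulating their weighted lengths in a loop with a break, B locates the cut position directly on the string with rfind(' ', 0, max_length) (falling back to the first newline, or to the whole string, when no newline fits) and slices once.
import Mathlib
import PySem

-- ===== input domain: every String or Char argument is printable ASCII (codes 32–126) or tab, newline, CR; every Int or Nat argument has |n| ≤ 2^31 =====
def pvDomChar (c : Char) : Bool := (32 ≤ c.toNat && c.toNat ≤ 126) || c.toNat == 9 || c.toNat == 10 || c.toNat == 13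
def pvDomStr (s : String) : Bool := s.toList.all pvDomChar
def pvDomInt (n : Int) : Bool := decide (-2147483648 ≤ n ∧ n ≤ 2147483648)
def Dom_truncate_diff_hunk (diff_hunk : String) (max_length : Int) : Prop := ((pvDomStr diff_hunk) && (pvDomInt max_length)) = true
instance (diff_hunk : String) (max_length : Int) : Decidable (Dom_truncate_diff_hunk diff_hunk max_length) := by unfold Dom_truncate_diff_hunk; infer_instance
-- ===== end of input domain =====

-- B truncates directly on the string via rfind/find of '\n' instead of A's
-- split-into-lines / accumulate-with-break / join; return values proved equal
-- on all inputs.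

-- ===== PORT A =====
-- the for-loop of A with its `break`: acc = truncated_lines, cnt = char_count
def truncA_loop (lines : List (List Char)) (acc : List (List Char)) (cnt : Int)
    (max_length : Int) : List (List Char) :=
  match lines with
  | [] => acc
  | line :: rest =>
    let line_length : Int := (line.length : Int) + 1
    if cnt + line_length > max_length ∧ acc ≠ [] then acc
    else truncA_loop rest (acc ++ [line]) (cnt + line_length) max_length

def truncate_diff_hunk (diff_hunk : String) (max_length : Int) : String :=
  if (PySem.Str.len diff_hunk : Int) ≤ max_length then diff_hunk
  else
    let lines := PySem.Chars.splitOn diff_hunk.toList ['\n']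
    let truncated_lines := truncA_loop lines [] 0 max_length
    String.ofList (PySem.Chars.join ['\n'] truncated_lines ++ "\n... (truncated)".toList)

-- ===== PORT B =====
def truncate_diff_hunk_alt (diff_hunk : String) (max_length : Int) : String :=
  if (PySem.Str.len diff_hunk : Int) ≤ max_length then diff_hunk
  else
    let cut0 := PySem.Str.rfindFrom diff_hunk "\n" 0 (some (max 0 max_length))
    let cut : Int :=
      if cut0 = -1 then
        let nl := PySem.Str.find diff_hunk "\n"
        if nl ≠ -1 then nl else (PySem.Str.len diff_hunk : Int)
      else cut0
    String.ofList (PySem.List.slice diff_hunk.toList none (some cut) ++ "\n... (truncated)".toList)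

-- ===== PRECONDITION & SPEC =====
def Spec_truncate_diff_hunk (diff_hunk : String) (max_length : Int) (out : String) : Prop := out = truncate_diff_hunk_alt diff_hunk max_length
instance (diff_hunk : String) (max_length : Int) (out : String) : Decidable (Spec_truncate_diff_hunk diff_hunk max_length out) := by unfold Spec_truncate_diff_hunk; infer_instance

-- ===== CLAIM (what is proved, stated in full; the proofs are below) =====
def Claim_equal_truncate_diff_hunk : Prop := ∀ (diff_hunk : String) (max_length : Int), Dom_truncate_diff_hunk diff_hunk max_length → Spec_truncate_diff_hunk diff_hunk max_length (truncate_diff_hunk diff_hunk max_length)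

-- ===== LEMMAS AND PROOFS =====

-- a simple structural reference for Python's str.split('\n') (single-char separator)
def mySplit (l : List Char) (c : Char) : List (List Char) :=
  match l with
  | [] => [[]]
  | a :: rest => if a = c then [] :: mySplit rest c else (mySplit rest c).modifyHead (a :: ·)

theorem mySplit_ne_nil (l : List Char) (c : Char) : mySplit l c ≠ [] := by
  cases l with
  | nil => simp [mySplit]
  | cons a rest =>
    simp only [mySplit]
    split
    · simp
    · cases h : mySplit rest c with
      | nil => exact absurd h (mySplit_ne_nil rest c)
      | cons x xs => simp

theorem splitOn_go_eq (c : Char) (l : List Char) : ∀ (fuel : Nat), l.length < fuel →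
    ∀ (cur : List Char) (acc : List (List Char)),
    PySem.Chars.splitOn.go [c] fuel l cur acc
      = acc.reverse ++ (mySplit l c).modifyHead (cur.reverse ++ ·) := by
  induction l with
  | nil =>
    intro fuel hf cur acc
    match fuel, hf with
    | f + 1, _ =>
      rw [PySem.Chars.splitOn.go]
      · simp [mySplit]
      · omega
  | cons a rest ih =>
    intro fuel hf cur acc
    match fuel, hf with
    | f + 1, hf =>
      rw [PySem.Chars.splitOn.go]
      by_cases hac : a = c
      · subst hac
        rw [if_pos (by simp [List.isPrefixOf])]
        simp only [List.length_cons, List.length_nil, List.drop_succ_cons, List.drop_zero]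
        rw [ih f (by simpa using hf) [] (cur.reverse :: acc)]
        simp only [mySplit, if_pos rfl]
        cases h : mySplit rest a with
        | nil => exact absurd h (mySplit_ne_nil rest a)
        | cons x xs => simp
      · rw [if_neg (by simp [List.isPrefixOf]; intro h; exact hac h.symm)]
        rw [ih f (by simpa using hf) (a :: cur) acc]
        simp only [mySplit, if_neg hac]
        cases h : mySplit rest c with
        | nil => exact absurd h (mySplit_ne_nil rest c)
        | cons x xs => simp

theorem splitOn_eq_mySplit (cs : List Char) (c : Char) :
    PySem.Chars.splitOn cs [c] = mySplit cs c := by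
  unfold PySem.Chars.splitOn
  rw [splitOn_go_eq c cs (cs.length + 1) (by omega) [] []]
  cases h : mySplit cs c with
  | nil => exact absurd h (mySplit_ne_nil cs c)
  | cons x xs => simp

theorem mySplit_spec (cs : List Char) (c : Char) :
    ∃ l0 T, mySplit cs c = l0 :: T ∧ cs = l0 ++ T.flatMap (c :: ·) ∧
      c ∉ l0 ∧ ∀ t ∈ T, c ∉ t := by
  induction cs with
  | nil => exact ⟨[], [], rfl, rfl, by simp, by simp⟩
  | cons a rest ih =>
    obtain ⟨l0, T, h1, h2, h3, h4⟩ := ih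
    by_cases hac : a = c
    · subst hac
      exact ⟨[], l0 :: T, by simp [mySplit, h1], by simpa using h2, by simp,
        by intro t ht; rcases List.mem_cons.mp ht with h | h; exacts [h ▸ h3, h4 t h]⟩
    · refine ⟨a :: l0, T, by simp [mySplit, hac, h1], by simpa using h2, ?_, h4⟩
      simp
      exact ⟨fun h => hac h.symm, h3⟩

theorem join_cons (c : Char) (l0 : List Char) (T : List (List Char)) :
    PySem.Chars.join [c] (l0 :: T) = l0 ++ T.flatMap (c :: ·) := by
  induction T generalizing l0 with
  | nil => simp [PySem.Chars.join_singleton]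
  | cons t0 T ih =>
    rw [PySem.Chars.join_cons_cons, ih]
    simp

theorem join_append_singleton (c : Char) (acc : List (List Char)) (t : List Char)
    (h : acc ≠ []) :
    PySem.Chars.join [c] (acc ++ [t]) = PySem.Chars.join [c] acc ++ c :: t := by
  match acc with
  | a :: rest =>
    have : a :: rest ++ [t] = a :: (rest ++ [t]) := by simp
    rw [this, join_cons, join_cons]
    simp

theorem singleton_isPrefixOf (c : Char) (u : List Char) :
    [c].isPrefixOf u = true ↔ u.head? = some c := by
  cases u with
  | nil => simp [List.isPrefixOf]
  | cons a t => simp [List.isPrefixOf, BEq.comm]; exact eq_comm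

theorem rfind_go_neg (c : Char) (t : List Char) : ∀ (j : Nat),
    (∀ i ≤ j, t[i]? ≠ some c) → PySem.Chars.rfind.go t [c] j = -1 := by
  intro j
  induction j with
  | zero =>
    intro h
    simp only [PySem.Chars.rfind.go]
    rw [if_neg]
    intro hp
    exact h 0 (le_refl 0) (by rw [← List.head?_drop, List.drop_zero]; exact (singleton_isPrefixOf c t).mp hp)
  | succ j ih =>
    intro h
    rw [PySem.Chars.rfind.go]
    rw [if_neg, ih (fun i hi => h i (Nat.le_succ_of_le hi))]
    intro hp
    exact h (j+1) (le_refl _) (by rw [← List.head?_drop]; exact (singleton_isPrefixOf c _).mp hp)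

theorem rfind_go_pos (c : Char) (t : List Char) : ∀ (j p : Nat), p ≤ j →
    t[p]? = some c → (∀ i, p < i → i ≤ j → t[i]? ≠ some c) →
    PySem.Chars.rfind.go t [c] j = (p : Int) := by
  intro j
  induction j with
  | zero =>
    intro p hp hc _
    interval_cases p
    simp only [PySem.Chars.rfind.go, Nat.cast_zero]
    rw [if_pos ((singleton_isPrefixOf c t).mpr (by simpa [List.head?_eq_getElem?] using hc))]
  | succ j ih =>
    intro p hp hc hafter
    rw [PySem.Chars.rfind.go]
    by_cases hpj : p = j + 1
    · subst hpj
      rw [if_pos ((singleton_isPrefixOf c _).mpr (by rw [List.head?_drop]; exact hc))]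
    · rw [if_neg, ih p (by omega) hc (fun i h1 h2 => hafter i h1 (Nat.le_succ_of_le h2))]
      intro hpre
      exact hafter (j+1) (by omega) (le_refl _) (by rw [← List.head?_drop]; exact (singleton_isPrefixOf c _).mp hpre)

theorem rfind_not_mem (c : Char) (t : List Char) (h : c ∉ t) :
    PySem.Chars.rfind t [c] = -1 := by
  unfold PySem.Chars.rfind
  exact rfind_go_neg c t t.length (fun i _ hc => h (List.mem_of_getElem? hc))

theorem rfind_append_last (c : Char) (P s : List Char) (hs : c ∉ s) :
    PySem.Chars.rfind (P ++ c :: s) [c] = (P.length : Int) := by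
  unfold PySem.Chars.rfind
  apply rfind_go_pos
  · simp
  · rw [List.getElem?_append_right (le_refl _)]
    simp
  · intro i h1 _ hc
    have hi : i - P.length - 1 < s.length := by
      by_contra hbig
      have : (P ++ c :: s)[i]? = none := by
        apply List.getElem?_eq_none
        simp; omega
      simp [this] at hc
    rw [List.getElem?_append_right (by omega)] at hc
    have h2 : i - P.length = (i - P.length - 1) + 1 := by omega
    rw [h2] at hc
    simp only [List.getElem?_cons_succ] at hc
    exact hs (List.mem_of_getElem? hc)

theorem find_go_neg (c : Char) (t : List Char) : ∀ (k : Nat), c ∉ t →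
    PySem.Chars.find.go [c] t k = -1 := by
  induction t with
  | nil => intro k _; simp [PySem.Chars.find.go]
  | cons a rest ih =>
    intro k h
    rw [PySem.Chars.find.go]
    rw [if_neg, ih (k+1) (fun hm => h (List.mem_cons_of_mem a hm))]
    intro hp
    have := (singleton_isPrefixOf c _).mp hp
    simp at this
    exact h (by simp [this])

theorem find_go_pos (c : Char) (P : List Char) (hP : c ∉ P) : ∀ (s : List Char) (k : Nat),
    PySem.Chars.find.go [c] (P ++ c :: s) k = (k : Int) + P.length := by
  induction P with
  | nil =>
    intro s k
    rw [List.nil_append, PySem.Chars.find.go]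
    rw [if_pos ((singleton_isPrefixOf c _).mpr (by simp))]
    simp
  | cons a rest ih =>
    intro s k
    rw [List.cons_append, PySem.Chars.find.go]
    rw [if_neg, ih (fun hm => hP (List.mem_cons_of_mem a hm)) s (k+1)]
    · push_cast [List.length_cons]; ring
    · intro hp
      have := (singleton_isPrefixOf c _).mp hp
      simp at this
      exact hP (by simp [this])

theorem rfindFrom_reduce (cs : List Char) (m : Int) (hm : m < (cs.length : Int)) :
    PySem.Chars.rfindFrom cs ['\n'] 0 (some (max 0 m))
      = PySem.Chars.rfind (cs.take m.toNat) ['\n'] := by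
  unfold PySem.Chars.rfindFrom
  have h1 : ¬ ((cs.length : Int) < max 0 m) := by omega
  have h2 : ¬ (max 0 m < (0:Int)) := by omega
  have h3 : (max 0 m).toNat = m.toNat := by omega
  simp only [if_neg h1, if_neg h2, h3]
  rw [if_neg (by omega)]
  split
  all_goals rename_i h
  all_goals simp_all

theorem core (c : Char) : ∀ (T : List (List Char)) (acc : List (List Char)) (m : Int),
    acc ≠ [] → (∀ t ∈ T, c ∉ t) →
    ((PySem.Chars.join [c] acc).length : Int) + 1 ≤ m →
    (m : Int) < ((PySem.Chars.join [c] acc ++ T.flatMap (c :: ·)).length : Int) →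
    ∃ p : Nat,
      PySem.Chars.rfind ((PySem.Chars.join [c] acc ++ T.flatMap (c :: ·)).take m.toNat) [c] = (p : Int) ∧
      PySem.Chars.join [c] (truncA_loop T acc (((PySem.Chars.join [c] acc).length : Int) + 1) m)
        = (PySem.Chars.join [c] acc ++ T.flatMap (c :: ·)).take p := by
  intro T
  induction T with
  | nil =>
    intro acc m _ _ hfit htot
    exfalso
    simp at htot
    omega
  | cons t0 rest ih =>
    intro acc m hacc hfree hfit htot
    set P := PySem.Chars.join [c] acc with hP
    by_cases hstop : ((P.length : Int) + 1) + ((t0.length : Int) + 1) > m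
    · -- the loop breaks: kept text is P; the last newline below m is the one at P.length
      refine ⟨P.length, ?_, ?_⟩
      · -- cs.take m.toNat = P ++ c :: t0.take (m.toNat - P.length - 1)
        have hsplit : (P ++ (t0 :: rest).flatMap (c :: ·)).take m.toNat
            = P ++ c :: (t0.take (m.toNat - P.length - 1)) := by
          have h1 : P.length + 1 ≤ m.toNat := by omega
          have h2 : m.toNat - P.length - 1 ≤ t0.length := by omega
          have h3 : m.toNat - P.length = (m.toNat - P.length - 1) + 1 := by omega
          simp only [List.flatMap_cons]
          rw [List.take_append, List.take_of_length_le (by omega), h3,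
            List.cons_append, List.take_succ_cons, List.take_append,
            Nat.sub_eq_zero_of_le (by omega : m.toNat - P.length - 1 ≤ t0.length), List.take_zero,
            List.append_nil]
          simp
        rw [hsplit]
        exact rfind_append_last c P _ (fun hmem => hfree t0 (by simp) (List.mem_of_mem_take hmem))
      · rw [truncA_loop]
        rw [if_pos ⟨by push_cast; omega, hacc⟩]
        simp only [List.flatMap_cons, ← hP]
        rw [List.cons_append, List.take_append,
          List.take_of_length_le (le_refl _), Nat.sub_self, List.take_zero, List.append_nil]
    · -- the loop keeps t0 and recurses
      rw [truncA_loop]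
      rw [if_neg (by push_cast; intro hand; exact absurd hand.1 (by omega))]
      have hacc' : acc ++ [t0] ≠ [] := by simp
      have hPnew : PySem.Chars.join [c] (acc ++ [t0]) = P ++ c :: t0 :=
        join_append_singleton c acc t0 hacc
      have hlen : ((PySem.Chars.join [c] (acc ++ [t0])).length : Int) + 1 ≤ m := by
        rw [hPnew]; simp; push_cast; omega
      have hflat : PySem.Chars.join [c] (acc ++ [t0]) ++ rest.flatMap (c :: ·)
          = P ++ (t0 :: rest).flatMap (c :: ·) := by
        rw [hPnew]; simp
      have htot' : (m : Int) < ((PySem.Chars.join [c] (acc ++ [t0]) ++ rest.flatMap (c :: ·)).length : Int) := by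
        rw [hflat]; exact htot
      have hcnt : ((PySem.Chars.join [c] (acc ++ [t0])).length : Int) + 1
          = ((P.length : Int) + 1) + ((t0.length : Int) + 1) := by
        rw [hPnew]; simp; push_cast; ring
      obtain ⟨p, hp1, hp2⟩ := ih (acc ++ [t0]) m hacc' (fun t ht => hfree t (by simp [ht])) hlen htot'
      refine ⟨p, ?_, ?_⟩
      · rw [← hflat]; exact hp1
      · rw [← hcnt, hp2, hflat]

theorem main_eq (d : String) (m : Int) :
    truncate_diff_hunk d m = truncate_diff_hunk_alt d m := by
  by_cases hle : (PySem.Str.len d : Int) ≤ m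
  · rw [truncate_diff_hunk, truncate_diff_hunk_alt, if_pos hle, if_pos hle]
  · have hm : m < (d.toList.length : Int) := by
      simp [PySem.Str.len] at hle ⊢
      omega
    rw [truncate_diff_hunk, truncate_diff_hunk_alt, if_neg hle, if_neg hle]
    obtain ⟨l0, T, hsplit, hcs, hl0, hT⟩ := mySplit_spec d.toList '\n'
    have hL : PySem.Chars.splitOn d.toList ['\n'] = l0 :: T := by
      rw [splitOn_eq_mySplit, hsplit]
    have hnl : "\n".toList = ['\n'] := rfl
    have hRf : PySem.Str.rfindFrom d "\n" 0 (some (max 0 m))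
        = PySem.Chars.rfind (d.toList.take m.toNat) ['\n'] := by
      rw [PySem.Str.rfindFrom_eq, hnl, rfindFrom_reduce _ _ hm]
    simp only [hL]
    rw [truncA_loop]
    rw [if_neg (by simp)]
    simp only [List.nil_append, zero_add]
    have hJ1 : PySem.Chars.join ['\n'] [l0] = l0 := by
      rw [join_cons]; simp
    by_cases hfit : (l0.length : Int) + 1 ≤ m
    · -- the first line fits: core applies
      obtain ⟨p, hp1, hp2⟩ := core '\n' T [l0] m (by simp) hT
        (by rw [hJ1]; exact hfit)
        (by rw [hJ1, ← hcs]; exact hm)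
      rw [hJ1] at hp1 hp2
      rw [← hcs] at hp1 hp2
      rw [hp2, hRf, hp1]
      rw [if_neg (by omega)]
      have hslice : PySem.List.slice d.toList none (some ((p : Nat) : Int))
          = d.toList.take p := by simp [pysem]
      rw [hslice]
    · -- the first line alone is kept
      cases T with
      | nil =>
        -- no newline at all in the text
        simp only [List.flatMap_nil, List.append_nil] at hcs
        rw [truncA_loop, hJ1]
        have hfree : '\n' ∉ d.toList := by rw [hcs]; exact hl0
        rw [hRf, rfind_not_mem _ _ (fun h => hfree (List.mem_of_mem_take h))]
        rw [if_pos rfl]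
        have hfind : PySem.Str.find d "\n" = -1 := by
          rw [PySem.Str.find_eq, hnl]
          unfold PySem.Chars.find
          exact find_go_neg _ _ 0 hfree
        rw [hfind]
        rw [if_neg (by simp)]
        have hslice : PySem.List.slice d.toList none (some (PySem.Str.len d : Int))
            = d.toList := by
          have h1 : (PySem.Str.len d : Int) = ((d.toList.length : Nat) : Int) := by
            simp [PySem.Str.len]
          rw [h1]
          simp [pysem]
        rw [hslice, hcs]
      | cons t0 rest =>
        -- text has a newline, but even the first line overflows: keep it anyway
        have hcs' : d.toList = l0 ++ '\n' :: (t0 ++ rest.flatMap ('\n' :: ·)) := by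
          rw [hcs]; simp
        rw [truncA_loop]
        rw [if_pos ⟨by push_cast; omega, by simp⟩]
        rw [hJ1]
        -- B: no newline below m, first newline at l0.length
        have htake : d.toList.take m.toNat = l0.take m.toNat := by
          rw [hcs', List.take_append, Nat.sub_eq_zero_of_le (by omega), List.take_zero,
            List.append_nil]
        rw [hRf, htake, rfind_not_mem _ _ (fun h => hl0 (List.mem_of_mem_take h))]
        rw [if_pos rfl]
        have hfind : PySem.Str.find d "\n" = ((l0.length : Nat) : Int) := by
          rw [PySem.Str.find_eq, hnl]
          unfold PySem.Chars.find
          rw [hcs']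
          rw [find_go_pos '\n' l0 hl0 (t0 ++ rest.flatMap ('\n' :: ·)) 0]
          ring
        rw [hfind]
        rw [if_pos (show ((l0.length : Nat) : Int) ≠ -1 by omega)]
        have hslice : PySem.List.slice d.toList none (some ((l0.length : Nat) : Int))
            = d.toList.take l0.length := by
          simp [pysem]
        rw [hslice, hcs', List.take_append, List.take_of_length_le (le_refl _), Nat.sub_self,
          List.take_zero, List.append_nil]

-- ===== VERDICT (by name: the statement is the Claim_ definition above) =====
theorem truncate_diff_hunk_spec : Claim_equal_truncate_diff_hunk := by
  intro d m _
  unfold Spec_truncate_diff_hunk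
  exact main_eq d m
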